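-- pv_equiv track=rewrite | github.com/fjienan/python_path_searching | core/astar.py | select_optimal_positions
-- ===== SOURCE A (Python) =====
-- from typing import List, Tuple, Set, Callable, Optional, Dict
--
-- def select_optimal_positions(
--
--     positions: List[Tuple[int, int]],
--     start: Tuple[int, int],
--     goal: Tuple[int, int],
--     max_count: int
-- ) -> List[Tuple[int, int]]:
--     """
--     从位置列表中选择最优的位置组合
--
--     选择距离起点和终点总距离最短、且大致在起点到终点路径上的位置
--
--     Args:
--         positions: 可选位置列表
--         start: 起点坐标
--         goal: 终点坐标
--         max_count: 最大选择数量
--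
--     Returns:
--         list: 选择的位置列表
--     """
--     if len(positions) <= max_count:
--         return positions
--
--     import itertools
--
--     scored_positions = []
--     start_row, start_col = start
--     goal_row, goal_col = goal
--
--     for row, col in positions:
--         dist_to_start = abs(row - start_row) + abs(col - start_col)
--         dist_to_goal = abs(row - goal_row) + abs(col - goal_col)
--         score = -(dist_to_start + dist_to_goal)
--
--         if (start_row <= row <= goal_row or goal_row <= row <= start_row) and \
--            (start_col <= col <= goal_col or goal_col <= col <= start_col):
--             score += 100
--
--         scored_positions.append((score, row, col))
--
--     scored_positions.sort(reverse=True, key=lambda x: x[0])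
--     candidates = [(row, col) for _, row, col in scored_positions]
--
--     best_combination = None
--     best_score = float('-inf')
--
--     for combo in itertools.combinations(candidates, max_count):
--         path_score = 0
--         prev_pos = start
--
--         for pos in combo:
--             dist = abs(pos[0] - prev_pos[0]) + abs(pos[1] - prev_pos[1])
--             path_score -= dist
--             prev_pos = pos
--
--         path_score -= abs(goal_row - prev_pos[0]) + abs(goal_col - prev_pos[1])
--
--         in_path_count = 0
--         for r, c in combo:
--             if (start_row <= r <= goal_row or goal_row <= r <= start_row) and \
--                (start_col <= c <= goal_col or goal_col <= c <= start_col):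
--                 in_path_count += 1
--                 path_score += 50
--
--         if path_score > best_score:
--             best_score = path_score
--             best_combination = list(combo)
--
--     if best_combination is None:
--         best_combination = candidates[:max_count]
--
--     return best_combination
-- ===== SOURCE B (Python) =====
-- def select_optimal_positions(positions, start, goal, max_count):
--     # DP over (prev position, next candidate index, remaining count) instead of
--     # enumerating all combinations: O(n^2*k) instead of O(C(n,k)*k), same result
--     # including A's first-encountered (lexicographic) tie-breaking.
--     if len(positions) <= max_count:
--         return positions
--
--     srow, scol = start
--     grow, gcol = goal
--
--     def in_rect(r, c):
--         return (srow <= r <= grow or grow <= r <= srow) and (scol <= c <= gcol or gcol <= c <= scol)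
--
--     def sort_key(p):
--         r, c = p
--         k = abs(r - srow) + abs(c - scol) + abs(r - grow) + abs(c - gcol)
--         return k - 100 if in_rect(r, c) else k
--
--     cands = sorted(positions, key=sort_key)
--     n = len(cands)
--     memo = {}
--
--     def best(prev, i, k):
--         # best (score, combo) choosing k of cands[i:], walking from prev,
--         # score includes the final leg to goal; ties prefer taking cands[i]
--         # (= lexicographically first combination, as A's strict '>' keeps).
--         if k == 0:
--             return (-(abs(grow - prev[0]) + abs(gcol - prev[1])), ())
--         if i >= n:
--             return None
--         key = (prev, i, k)
--         if key in memo: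
--             return memo[key]
--         r, c = cands[i]
--         take = best((r, c), i + 1, k - 1)
--         if take is not None:
--             s = take[0] - (abs(r - prev[0]) + abs(c - prev[1])) + (50 if in_rect(r, c) else 0)
--             take = (s, ((r, c),) + take[1])
--         skip = best(prev, i + 1, k)
--         if take is None:
--             res = skip
--         elif skip is None or take[0] >= skip[0]:
--             res = take
--         else:
--             res = skip
--         memo[key] = res
--         return res
--
--     return list(best(start, 0, max_count)[1])
-- ===== Notes on version B (the rewrite author's own statement) =====
-- stated objective: faster
-- what changed: A scores every one of the C(n,k) combinations of the sorted candidate list; B replaces that enumeration with a memoised take/skip recursion over (previous position, next index, remaining count), reconstructing the same lexicographically-first optimal combination (ties prefer the take branch, matching A's strict '>' keep rule).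
import Mathlib
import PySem

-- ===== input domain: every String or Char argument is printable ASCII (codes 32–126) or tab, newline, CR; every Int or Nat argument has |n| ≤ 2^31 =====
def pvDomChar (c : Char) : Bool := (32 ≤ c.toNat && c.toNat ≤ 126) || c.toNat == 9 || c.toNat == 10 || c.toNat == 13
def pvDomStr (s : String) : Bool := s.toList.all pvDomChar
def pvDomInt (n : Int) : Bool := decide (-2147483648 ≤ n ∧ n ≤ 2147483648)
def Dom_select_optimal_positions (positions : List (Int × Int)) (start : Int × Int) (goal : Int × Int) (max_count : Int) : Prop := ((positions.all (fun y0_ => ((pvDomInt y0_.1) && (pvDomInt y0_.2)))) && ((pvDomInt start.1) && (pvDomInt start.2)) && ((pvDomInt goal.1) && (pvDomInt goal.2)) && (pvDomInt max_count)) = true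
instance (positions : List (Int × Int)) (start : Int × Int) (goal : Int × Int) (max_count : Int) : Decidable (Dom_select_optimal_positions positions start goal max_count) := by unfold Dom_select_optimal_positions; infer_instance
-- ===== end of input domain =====

-- B replaces A's enumeration of all C(n,k) combinations by a take/skip recursion over the
-- sorted candidate list (memoised in Source B), keeping A's exact result including tie order.

-- ===== PORT A =====
-- itertools.combinations(xs, k), in Python's (lexicographic) generation order
def pyCombinations {α : Type} : Nat → List α → List (List α)
  | 0, _ => [[]]
  | _ + 1, [] => []
  | k + 1, x :: xs => (pyCombinations k xs).map (fun c => x :: c) ++ pyCombinations (k + 1) xs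

-- the body of A's combination loop: path-distance fold, goal leg, then the in-path bonus fold
def aPathScore (sr sc gr gc : Int) (start : Int × Int) (combo : List (Int × Int)) : Int :=
  let st := combo.foldl (fun (st : Int × (Int × Int)) pos =>
      (st.1 - (|pos.1 - st.2.1| + |pos.2 - st.2.2|), pos)) ((0 : Int), start)
  let ps := st.1 - (|gr - st.2.1| + |gc - st.2.2|)
  let st2 := combo.foldl (fun (st : Int × Int) q =>
      if ((sr ≤ q.1 && q.1 ≤ gr) || (gr ≤ q.1 && q.1 ≤ sr)) &&
         ((sc ≤ q.2 && q.2 ≤ gc) || (gc ≤ q.2 && q.2 ≤ sc))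
      then (st.1 + 1, st.2 + 50) else st) ((0 : Int), ps)
  st2.2

def select_optimal_positions (positions : List (Int × Int)) (start : Int × Int) (goal : Int × Int) (max_count : Int) : List (Int × Int) :=
  if (positions.length : Int) ≤ max_count then positions
  else
    let sr := start.1; let sc := start.2; let gr := goal.1; let gc := goal.2
    let scored := positions.foldl (fun acc p =>
      acc ++ [((let dts := |p.1 - sr| + |p.2 - sc|
                let dtg := |p.1 - gr| + |p.2 - gc|
                let score := -(dts + dtg)
                if ((sr ≤ p.1 && p.1 ≤ gr) || (gr ≤ p.1 && p.1 ≤ sr)) &&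
                   ((sc ≤ p.2 && p.2 ≤ gc) || (gc ≤ p.2 && p.2 ≤ sc))
                then score + 100 else score), p.1, p.2)]) ([] : List (Int × Int × Int))
    let scoredSorted := PySem.List.sorted scored (fun x => x.1) true
    let candidates := scoredSorted.map (fun t => (t.2.1, t.2.2))
    let combos := pyCombinations max_count.toNat candidates
    let best := combos.foldl (fun (best : Option (Int × List (Int × Int))) combo =>
      let ps := aPathScore sr sc gr gc start combo
      match best with
      | none => some (ps, combo)
      | some b => if ps > b.1 then some (ps, combo) else some b) none
    match best with
    | none => candidates.take max_count.toNat
    | some b => b.2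

-- ===== PORT B =====
def bInRect (sr sc gr gc r c : Int) : Bool :=
  ((sr ≤ r && r ≤ gr) || (gr ≤ r && r ≤ sr)) && ((sc ≤ c && c ≤ gc) || (gc ≤ c && c ≤ sc))

def bSortKey (sr sc gr gc : Int) (p : Int × Int) : Int :=
  let k := |p.1 - sr| + |p.2 - sc| + |p.1 - gr| + |p.2 - gc|
  if bInRect sr sc gr gc p.1 p.2 then k - 100 else k

-- Source B's recursive `best(prev, i, k)`; Source B's dict memoisation is a pure cache and does
-- not change the computed value, so the port is the plain recursion.
def bBest (sr sc gr gc : Int) (cands : List (Int × Int)) (prev : Int × Int) (i k : Nat) : Option (Int × List (Int × Int)) :=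
  if k = 0 then some (-(|gr - prev.1| + |gc - prev.2|), [])
  else if h : i < cands.length then
    let p := cands[i]
    let take := (bBest sr sc gr gc cands p (i + 1) (k - 1)).map
      (fun t => (t.1 - (|p.1 - prev.1| + |p.2 - prev.2|) +
                 (if bInRect sr sc gr gc p.1 p.2 then 50 else 0), p :: t.2))
    let skip := bBest sr sc gr gc cands prev (i + 1) k
    match take, skip with
    | none, s => s
    | some t, none => some t
    | some t, some s => if t.1 ≥ s.1 then some t else some s
  else none
termination_by cands.length - i
decreasing_by all_goals omega

def select_optimal_positions_alt (positions : List (Int × Int)) (start : Int × Int) (goal : Int × Int) (max_count : Int) : List (Int × Int) :=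
  if (positions.length : Int) ≤ max_count then positions
  else
    let sr := start.1; let sc := start.2; let gr := goal.1; let gc := goal.2
    let cands := PySem.List.sorted positions (bSortKey sr sc gr gc) false
    match bBest sr sc gr gc cands start 0 max_count.toNat with
    | some t => t.2
    | none => []  -- unreachable under Pre_ (Source B would raise there)

-- ===== PRECONDITION & SPEC =====
-- A raises ValueError (itertools.combinations with negative r) when max_count < 0, and
-- Source B raises there too; Pre_ excludes exactly those inputs.
def Pre_select_optimal_positions (positions : List (Int × Int)) (start : Int × Int) (goal : Int × Int) (max_count : Int) : Prop := 0 ≤ max_count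
instance (positions : List (Int × Int)) (start : Int × Int) (goal : Int × Int) (max_count : Int) : Decidable (Pre_select_optimal_positions positions start goal max_count) := by unfold Pre_select_optimal_positions; infer_instance

def pvWitness_select_optimal_positions : (List (Int × Int)) × (Int × Int) × (Int × Int) × Int :=
  ([(0, 0), (2, 2), (5, 1)], (0, 0), (3, 3), 2)

def Spec_select_optimal_positions (positions : List (Int × Int)) (start : Int × Int) (goal : Int × Int) (max_count : Int) (out : List (Int × Int)) : Prop := out = select_optimal_positions_alt positions start goal max_count
instance (positions : List (Int × Int)) (start : Int × Int) (goal : Int × Int) (max_count : Int) (out : List (Int × Int)) : Decidable (Spec_select_optimal_positions positions start goal max_count out) := by unfold Spec_select_optimal_positions; infer_instance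

-- ===== CLAIM (what is proved, stated in full; the proofs are below) =====
def Claim_equal_select_optimal_positions : Prop := ∀ (positions : List (Int × Int)) (start : Int × Int) (goal : Int × Int) (max_count : Int), Dom_select_optimal_positions positions start goal max_count → Pre_select_optimal_positions positions start goal max_count → Spec_select_optimal_positions positions start goal max_count (select_optimal_positions positions start goal max_count)

-- ===== LEMMAS AND PROOFS =====

-- the clean recursive chain score both sides compute
def csc (sr sc gr gc : Int) (prev : Int × Int) : List (Int × Int) → Int
  | [] => -(|gr - prev.1| + |gc - prev.2|)
  | p :: ps => csc sr sc gr gc p ps - (|p.1 - prev.1| + |p.2 - prev.2|) +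
               (if bInRect sr sc gr gc p.1 p.2 then 50 else 0)

-- 'first strict maximum' merge: left (earlier) wins ties
def mrg : Option (Int × List (Int × Int)) → Option (Int × List (Int × Int)) → Option (Int × List (Int × Int))
  | none, b => b
  | some a, none => some a
  | some a, some b => if a.1 < b.1 then some b else some a

def fstep (sr sc gr gc : Int) (prev : Int × Int) (best : Option (Int × List (Int × Int))) (combo : List (Int × Int)) : Option (Int × List (Int × Int)) :=
  match best with
  | none => some (csc sr sc gr gc prev combo, combo)
  | some b => if csc sr sc gr gc prev combo > b.1 then some (csc sr sc gr gc prev combo, combo) else some b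

def FM (sr sc gr gc : Int) (prev : Int × Int) (L : List (List (Int × Int))) : Option (Int × List (Int × Int)) :=
  L.foldl (fstep sr sc gr gc prev) none

lemma fstep_eq_mrg (sr sc gr gc : Int) (prev : Int × Int) (acc : Option (Int × List (Int × Int))) (c : List (Int × Int)) :
    fstep sr sc gr gc prev acc c = mrg acc (some (csc sr sc gr gc prev c, c)) := by
  rcases acc with _ | a <;> simp only [fstep, mrg, gt_iff_lt]

lemma mrg_assoc (a b c : Option (Int × List (Int × Int))) : mrg (mrg a b) c = mrg a (mrg b c) := by
  rcases a with _ | a <;> rcases b with _ | b <;> rcases c with _ | c <;>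
    simp only [mrg] <;> split_ifs <;> simp only [mrg] <;> split_ifs <;>
    first | rfl | omega

lemma foldl_fstep_acc (sr sc gr gc : Int) (prev : Int × Int) (L : List (List (Int × Int))) :
    ∀ acc, L.foldl (fstep sr sc gr gc prev) acc = mrg acc (FM sr sc gr gc prev L) := by
  induction L with
  | nil => intro acc; rcases acc with _ | a <;> simp [FM, mrg]
  | cons c L ih =>
      intro acc
      simp only [FM, List.foldl_cons] at *
      rw [ih (fstep sr sc gr gc prev acc c), ih (fstep sr sc gr gc prev none c),
        fstep_eq_mrg, fstep_eq_mrg, mrg_assoc]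
      simp [mrg]

lemma FM_cons (sr sc gr gc : Int) (prev : Int × Int) (c : List (Int × Int)) (L : List (List (Int × Int))) :
    FM sr sc gr gc prev (c :: L) = mrg (some (csc sr sc gr gc prev c, c)) (FM sr sc gr gc prev L) := by
  simp only [FM, List.foldl_cons]
  rw [show fstep sr sc gr gc prev none c = some (csc sr sc gr gc prev c, c) from rfl]
  exact foldl_fstep_acc sr sc gr gc prev L _

lemma FM_append (sr sc gr gc : Int) (prev : Int × Int) (L1 L2 : List (List (Int × Int))) :
    FM sr sc gr gc prev (L1 ++ L2) = mrg (FM sr sc gr gc prev L1) (FM sr sc gr gc prev L2) := by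
  simp only [FM, List.foldl_append]
  exact foldl_fstep_acc sr sc gr gc prev L2 _

lemma mrg_map_shift (d bo : Int) (p : Int × Int) (u : Int × List (Int × Int)) (v : Option (Int × List (Int × Int))) :
    Option.map (fun t => (t.1 - d + bo, p :: t.2)) (mrg (some u) v) =
      mrg (some (u.1 - d + bo, p :: u.2)) (Option.map (fun t => (t.1 - d + bo, p :: t.2)) v) := by
  rcases v with _ | v <;> simp only [mrg, Option.map] <;> split_ifs <;> first | rfl | omega

lemma FM_map_cons (sr sc gr gc : Int) (prev p : Int × Int) (L : List (List (Int × Int))) :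
    FM sr sc gr gc prev (L.map (fun c => p :: c)) =
      Option.map (fun t => (t.1 - (|p.1 - prev.1| + |p.2 - prev.2|) +
            (if bInRect sr sc gr gc p.1 p.2 then 50 else 0), p :: t.2))
        (FM sr sc gr gc p L) := by
  induction L with
  | nil => simp [FM]
  | cons x L ih =>
      simp only [List.map_cons]
      rw [FM_cons, FM_cons, ih, mrg_map_shift]
      rfl

lemma match_eq_mrg (t s : Option (Int × List (Int × Int))) :
    (match t, s with
      | none, s => s
      | some t, none => some t
      | some t, some s => if t.1 ≥ s.1 then some t else some s) = mrg t s := by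
  rcases t with _ | t <;> rcases s with _ | s <;> simp only [mrg] <;> split_ifs <;>
    first | rfl | omega

lemma bBest_out (sr sc gr gc : Int) (cands : List (Int × Int)) (prev : Int × Int) (i k : Nat)
    (hi : cands.length ≤ i) :
    bBest sr sc gr gc cands prev i k = FM sr sc gr gc prev (pyCombinations k (cands.drop i)) := by
  rw [List.drop_eq_nil_of_le hi, bBest]
  cases k with
  | zero => simp [pyCombinations, FM, fstep, csc]
  | succ k =>
      simp only [pyCombinations, FM, List.foldl_nil, Nat.succ_ne_zero, if_false]
      rw [dif_neg (by omega)]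

lemma bBest_eq_FM (sr sc gr gc : Int) (cands : List (Int × Int)) :
    ∀ d i k prev, cands.length - i ≤ d →
      bBest sr sc gr gc cands prev i k = FM sr sc gr gc prev (pyCombinations k (cands.drop i)) := by
  intro d
  induction d with
  | zero => intro i k prev h; exact bBest_out sr sc gr gc cands prev i k (by omega)
  | succ d ih =>
      intro i k prev h
      by_cases hi : i < cands.length
      · have hdrop : cands.drop i = cands[i] :: cands.drop (i + 1) :=
          (List.getElem_cons_drop hi).symm
        cases k with
        | zero => rw [bBest, if_pos rfl, hdrop]; rfl
        | succ k =>
            rw [bBest]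
            simp only [Nat.succ_ne_zero, if_false, dif_pos hi, Nat.add_sub_cancel]
            rw [ih (i + 1) k cands[i] (by omega), ih (i + 1) (k + 1) prev (by omega)]
            rw [hdrop]
            show _ = FM sr sc gr gc prev (pyCombinations (k + 1) (cands[i] :: cands.drop (i + 1)))
            rw [show pyCombinations (k + 1) (cands[i] :: cands.drop (i + 1)) =
                  (pyCombinations k (cands.drop (i + 1))).map (fun c => cands[i] :: c) ++
                  pyCombinations (k + 1) (cands.drop (i + 1)) from rfl]
            rw [FM_append, FM_map_cons, match_eq_mrg]
      · exact bBest_out sr sc gr gc cands prev i k (by omega)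

lemma pyCombinations_ne_nil {α : Type} : ∀ (k : Nat) (L : List α), k ≤ L.length →
    pyCombinations k L ≠ [] := by
  intro k L
  induction L generalizing k with
  | nil =>
      intro h
      have hk : k = 0 := by simpa using h
      subst hk; simp [pyCombinations]
  | cons x xs ih =>
      intro h
      cases k with
      | zero => simp [pyCombinations]
      | succ k =>
          have := ih k (by simpa using h)
          simp only [pyCombinations, ne_eq, List.append_eq_nil_iff, List.map_eq_nil_iff]
          tauto

lemma FM_ne_none (sr sc gr gc : Int) (prev : Int × Int) (L : List (List (Int × Int))) (h : L ≠ []) :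
    FM sr sc gr gc prev L ≠ none := by
  rcases L with _ | ⟨c, L⟩
  · exact absurd rfl h
  · rw [FM_cons]
    rcases FM sr sc gr gc prev L with _ | v <;> simp only [mrg] <;> (try split_ifs) <;> simp

def dsum (prev : Int × Int) : List (Int × Int) → Int
  | [] => 0
  | p :: ps => (|p.1 - prev.1| + |p.2 - prev.2|) + dsum p ps

def lastP (prev : Int × Int) : List (Int × Int) → (Int × Int)
  | [] => prev
  | p :: ps => lastP p ps

def bsum (sr sc gr gc : Int) : List (Int × Int) → Int
  | [] => 0
  | p :: ps => (if bInRect sr sc gr gc p.1 p.2 then 50 else 0) + bsum sr sc gr gc ps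

lemma fold1_eq (combo : List (Int × Int)) : ∀ (a : Int) (prev : Int × Int),
    combo.foldl (fun (st : Int × (Int × Int)) pos =>
        (st.1 - (|pos.1 - st.2.1| + |pos.2 - st.2.2|), pos)) (a, prev) =
      (a - dsum prev combo, lastP prev combo) := by
  induction combo with
  | nil => intro a prev; simp [dsum, lastP]
  | cons p ps ih =>
      intro a prev
      simp only [List.foldl_cons, ih, dsum, lastP, Prod.mk.injEq]
      exact ⟨by omega, trivial⟩

lemma fold2_snd (sr sc gr gc : Int) (combo : List (Int × Int)) : ∀ (c s : Int),
    (combo.foldl (fun (st : Int × Int) q =>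
        if ((sr ≤ q.1 && q.1 ≤ gr) || (gr ≤ q.1 && q.1 ≤ sr)) &&
           ((sc ≤ q.2 && q.2 ≤ gc) || (gc ≤ q.2 && q.2 ≤ sc))
        then (st.1 + 1, st.2 + 50) else st) (c, s)).2 = s + bsum sr sc gr gc combo := by
  induction combo with
  | nil => intro c s; simp [bsum]
  | cons p ps ih =>
      intro c s
      simp only [List.foldl_cons, bsum, bInRect]
      split_ifs <;> simp only [ih] <;> omega

lemma csc_eq (sr sc gr gc : Int) (combo : List (Int × Int)) : ∀ prev,
    csc sr sc gr gc prev combo =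
      -(dsum prev combo) - (|gr - (lastP prev combo).1| + |gc - (lastP prev combo).2|) +
        bsum sr sc gr gc combo := by
  induction combo with
  | nil => intro prev; simp [csc, dsum, lastP, bsum]
  | cons p ps ih =>
      intro prev
      simp only [csc, dsum, lastP, bsum, ih p]
      omega

lemma aPathScore_eq (sr sc gr gc : Int) (prev : Int × Int) (combo : List (Int × Int)) :
    aPathScore sr sc gr gc prev combo = csc sr sc gr gc prev combo := by
  simp only [aPathScore, fold1_eq, fold2_snd, csc_eq]
  omega

lemma insertBy_map {α β : Type} (f : α → β) (bef1 : β → β → Bool) (bef2 : α → α → Bool)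
    (hb : ∀ a b, bef1 (f a) (f b) = bef2 a b) (x : α) :
    ∀ acc : List α, PySem.List.insertBy bef1 (f x) (acc.map f) =
      (PySem.List.insertBy bef2 x acc).map f := by
  intro acc
  induction acc with
  | nil => simp [PySem.List.insertBy]
  | cons y ys ih =>
      simp only [List.map_cons, PySem.List.insertBy, hb]
      cases h : bef2 x y <;> simp [h, ih]

lemma foldl_insertBy_map {α β : Type} (f : α → β) (bef1 : β → β → Bool) (bef2 : α → α → Bool)
    (hb : ∀ a b, bef1 (f a) (f b) = bef2 a b) (xs : List α) :
    ∀ accB : List α,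
      (xs.map f).foldl (fun acc y => PySem.List.insertBy bef1 y acc) (accB.map f) =
        (xs.foldl (fun acc x => PySem.List.insertBy bef2 x acc) accB).map f := by
  induction xs with
  | nil => intro accB; simp
  | cons x xs ih =>
      intro accB
      simp only [List.map_cons, List.foldl_cons]
      rw [insertBy_map f bef1 bef2 hb x accB, ih]

lemma sorted_strip (sr sc gr gc : Int) (positions : List (Int × Int)) :
    (PySem.List.sorted
        (positions.map (fun p =>
          ((if ((sr ≤ p.1 && p.1 ≤ gr) || (gr ≤ p.1 && p.1 ≤ sr)) &&
               ((sc ≤ p.2 && p.2 ≤ gc) || (gc ≤ p.2 && p.2 ≤ sc))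
            then -((|p.1 - sr| + |p.2 - sc|) + (|p.1 - gr| + |p.2 - gc|)) + 100
            else -((|p.1 - sr| + |p.2 - sc|) + (|p.1 - gr| + |p.2 - gc|))), p.1, p.2)))
        (fun x => x.1) true).map (fun t => (t.2.1, t.2.2)) =
      PySem.List.sorted positions (bSortKey sr sc gr gc) false := by
  rw [PySem.List.sorted_rev_eq_foldl_insertBy, PySem.List.sorted_eq_foldl_insertBy]
  rw [show ([] : List (Int × Int × Int)) = ([] : List (Int × Int)).map (fun p : Int × Int =>
          (((if ((sr ≤ p.1 && p.1 ≤ gr) || (gr ≤ p.1 && p.1 ≤ sr)) &&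
               ((sc ≤ p.2 && p.2 ≤ gc) || (gc ≤ p.2 && p.2 ≤ sc))
            then -((|p.1 - sr| + |p.2 - sc|) + (|p.1 - gr| + |p.2 - gc|)) + 100
            else -((|p.1 - sr| + |p.2 - sc|) + (|p.1 - gr| + |p.2 - gc|))) : Int), p.1, p.2)) from rfl]
  have hb : ∀ a b : Int × Int,
      (decide (((if ((sr ≤ b.1 && b.1 ≤ gr) || (gr ≤ b.1 && b.1 ≤ sr)) &&
               ((sc ≤ b.2 && b.2 ≤ gc) || (gc ≤ b.2 && b.2 ≤ sc))
            then -((|b.1 - sr| + |b.2 - sc|) + (|b.1 - gr| + |b.2 - gc|)) + 100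
            else -((|b.1 - sr| + |b.2 - sc|) + (|b.1 - gr| + |b.2 - gc|))) : Int) <
        ((if ((sr ≤ a.1 && a.1 ≤ gr) || (gr ≤ a.1 && a.1 ≤ sr)) &&
               ((sc ≤ a.2 && a.2 ≤ gc) || (gc ≤ a.2 && a.2 ≤ sc))
            then -((|a.1 - sr| + |a.2 - sc|) + (|a.1 - gr| + |a.2 - gc|)) + 100
            else -((|a.1 - sr| + |a.2 - sc|) + (|a.1 - gr| + |a.2 - gc|))) : Int))) =
      decide (bSortKey sr sc gr gc a < bSortKey sr sc gr gc b) := by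
    intro a b
    simp only [decide_eq_decide, bSortKey, bInRect]
    split_ifs <;> omega
  rw [foldl_insertBy_map
      (fun p : Int × Int => (((if ((sr ≤ p.1 && p.1 ≤ gr) || (gr ≤ p.1 && p.1 ≤ sr)) &&
               ((sc ≤ p.2 && p.2 ≤ gc) || (gc ≤ p.2 && p.2 ≤ sc))
            then -((|p.1 - sr| + |p.2 - sc|) + (|p.1 - gr| + |p.2 - gc|)) + 100
            else -((|p.1 - sr| + |p.2 - sc|) + (|p.1 - gr| + |p.2 - gc|))) : Int), p.1, p.2))
      (fun (y z : Int × Int × Int) => decide (z.1 < y.1))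
      (fun a b => decide (bSortKey sr sc gr gc a < bSortKey sr sc gr gc b))
      hb positions []]
  rw [List.map_map]
  exact List.map_id' _

-- ===== VERDICT (by name: the statement is the Claim_ definition above) =====
theorem select_optimal_positions_spec : Claim_equal_select_optimal_positions := by
  intro positions start goal mc hdom hpre
  have hpre' : (0:Int) ≤ mc := hpre
  show select_optimal_positions positions start goal mc = select_optimal_positions_alt positions start goal mc
  rw [select_optimal_positions, select_optimal_positions_alt]
  by_cases hle : (positions.length : Int) ≤ mc
  · rw [if_pos hle, if_pos hle]
  · simp only [if_neg hle]
    rw [PySem.List.foldl_append_singleton_eq_map]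
    simp only [List.nil_append]
    rw [sorted_strip]
    have hfun : (fun (best : Option (Int × List (Int × Int))) combo =>
        match best with
        | none => some (aPathScore start.1 start.2 goal.1 goal.2 start combo, combo)
        | some b => if aPathScore start.1 start.2 goal.1 goal.2 start combo > b.1 then
            some (aPathScore start.1 start.2 goal.1 goal.2 start combo, combo) else some b)
        = fstep start.1 start.2 goal.1 goal.2 start := by
      funext best combo
      simp only [aPathScore_eq]
      rfl
    rw [hfun]
    rw [show List.foldl (fstep start.1 start.2 goal.1 goal.2 start) none
        (pyCombinations mc.toNat (PySem.List.sorted positions (bSortKey start.1 start.2 goal.1 goal.2))) =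
        FM start.1 start.2 goal.1 goal.2 start (pyCombinations mc.toNat (PySem.List.sorted positions (bSortKey start.1 start.2 goal.1 goal.2))) from rfl]
    rw [bBest_eq_FM start.1 start.2 goal.1 goal.2
        (PySem.List.sorted positions (bSortKey start.1 start.2 goal.1 goal.2))
        (PySem.List.sorted positions (bSortKey start.1 start.2 goal.1 goal.2)).length 0 mc.toNat start (by omega)]
    simp only [List.drop_zero]
    have hlen : (PySem.List.sorted positions (bSortKey start.1 start.2 goal.1 goal.2)).length = positions.length :=
      (PySem.List.sorted_perm positions (bSortKey start.1 start.2 goal.1 goal.2) false).length_eq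
    have hk : mc.toNat ≤ (PySem.List.sorted positions (bSortKey start.1 start.2 goal.1 goal.2)).length := by
      rw [hlen]; omega
    obtain ⟨t, ht⟩ := Option.ne_none_iff_exists'.mp
      (FM_ne_none start.1 start.2 goal.1 goal.2 start _ (pyCombinations_ne_nil mc.toNat _ hk))
    rw [ht]
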